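-- pv_equiv track=rewrite | github.com/cardinaler/CV | codeforces/codeforces/1363B.py | found_010
-- ===== SOURCE A (Python) =====
-- def found_010(s):
-- 	n = len(s)
-- 	score = 0
-- 	c = '0'
-- 	for i in range(n):
-- 		if s[i] == c:
-- 			if c == '0':
-- 				c = '1'
-- 			else:
-- 				c = '0'
-- 				pos = i
-- 			score += 1
-- 			if score == 3:
-- 				return pos
-- 	return 0
-- ===== SOURCE B (Python) =====
-- def _find(s, ch, start):
--     for i in range(start, len(s)):
--         if s[i] == ch:
--             return i
--     return -1
--
--
-- def found_010(s):
--     i0 = _find(s, '0', 0)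
--     if i0 == -1:
--         return 0
--     i1 = _find(s, '1', i0 + 1)
--     if i1 == -1:
--         return 0
--     if _find(s, '0', i1 + 1) == -1:
--         return 0
--     return i1
-- ===== Notes on version B (the rewrite author's own statement) =====
-- stated objective: simpler
-- what changed: Replaces A's single state-machine loop (score/expected-char/pos bookkeeping) by three staged leftmost searches: the first zero, the first one after it, and the closing zero; it returns the index of the middle one.
import Mathlib
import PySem

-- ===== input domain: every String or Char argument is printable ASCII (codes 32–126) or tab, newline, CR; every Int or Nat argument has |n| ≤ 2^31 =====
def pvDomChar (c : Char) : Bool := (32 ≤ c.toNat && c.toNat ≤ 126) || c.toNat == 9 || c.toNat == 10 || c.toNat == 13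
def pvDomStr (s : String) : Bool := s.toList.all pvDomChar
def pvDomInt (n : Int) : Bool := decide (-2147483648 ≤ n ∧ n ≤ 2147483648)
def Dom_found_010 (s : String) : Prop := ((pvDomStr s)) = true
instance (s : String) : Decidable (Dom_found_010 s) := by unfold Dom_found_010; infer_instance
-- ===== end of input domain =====

-- B replaces A's one state-machine loop by three staged leftmost searches (zero, then one, then zero); objective: simpler.

-- ===== PORT A =====
-- A's for-loop over range(n) with state (score, expected char c, pos); Python's `pos` is
-- unassigned until score reaches 2 but is only read at score == 3, so initialising it to 0
-- in the port is exact.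
def goA : List Char → Int → Int → Char → Int → Int
  | [], _, _, _, _ => 0
  | x :: rest, i, score, c, pos =>
    if x = c then
      if c = '0' then
        if score + 1 = 3 then pos else goA rest (i + 1) (score + 1) '1' pos
      else
        if score + 1 = 3 then i else goA rest (i + 1) (score + 1) '0' i
    else goA rest (i + 1) score c pos

def found_010 (s : String) : Int := goA s.toList 0 0 '0' 0

-- ===== PORT B =====
-- Source B's `_find(s, ch, start)`: `for i in range(start, len(s)): if s[i] == ch: return i` —
-- scanning s[i] for i from start onward is exactly scanning s.drop start with counter i = start
-- (start is always a non-negative in-range Int at every call site below).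
def goFind : List Char → Int → Char → Int
  | [], _, _ => -1
  | x :: rest, i, c => if x = c then i else goFind rest (i + 1) c

def findCh (cs : List Char) (c : Char) (start : Int) : Int :=
  goFind (cs.drop start.toNat) start c

def found_010_alt (s : String) : Int :=
  let cs := s.toList
  let i0 := findCh cs '0' 0
  if i0 = -1 then 0
  else
    let i1 := findCh cs '1' (i0 + 1)
    if i1 = -1 then 0
    else if findCh cs '0' (i1 + 1) = -1 then 0
    else i1

-- ===== PRECONDITION & SPEC =====
def Spec_found_010 (s : String) (out : Int) : Prop := out = found_010_alt s
instance (s : String) (out : Int) : Decidable (Spec_found_010 s out) := by unfold Spec_found_010; infer_instance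

-- ===== CLAIM (what is proved, stated in full; the proofs are below) =====
def Claim_equal_found_010 : Prop := ∀ (s : String), Dom_found_010 s → Spec_found_010 s (found_010 s)

-- ===== LEMMAS AND PROOFS =====

lemma goFind_not_mem (cs : List Char) (i : Int) (c : Char) (h : c ∉ cs) :
    goFind cs i c = -1 := by
  induction cs generalizing i with
  | nil => rfl
  | cons x rest ih =>
    simp only [List.mem_cons, not_or] at h
    simp [goFind, Ne.symm h.1, ih _ h.2]

lemma goFind_mem (cs : List Char) (i : Int) (c : Char) (h : c ∈ cs) :
    goFind cs i c = i + cs.idxOf c := by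
  induction cs generalizing i with
  | nil => cases h
  | cons x rest ih =>
    by_cases hx : x = c
    · subst hx; simp [goFind, List.idxOf_cons_self]
    · have hm : c ∈ rest := by
        rcases List.mem_cons.mp h with h' | h'
        · exact absurd h'.symm hx
        · exact h'
      simp only [goFind, if_neg hx, ih _ hm, List.idxOf_cons_ne _ hx]
      push_cast
      ring

lemma phase0 (cs : List Char) (i p : Int) :
    goA cs i 0 '0' p =
      if '0' ∈ cs then goA (cs.drop (cs.idxOf '0' + 1)) (i + cs.idxOf '0' + 1) 1 '1' p
      else 0 := by
  induction cs generalizing i with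
  | nil => rfl
  | cons x rest ih =>
    by_cases hx : x = '0'
    · subst hx
      simp [goA, List.idxOf_cons_self]
    · simp only [goA, if_neg hx, ih (i + 1), List.mem_cons, List.idxOf_cons_ne _ hx,
        Nat.succ_eq_add_one]
      have hiff : ('0' = x ∨ '0' ∈ rest) ↔ '0' ∈ rest := or_iff_right (fun h => hx h.symm)
      rw [if_congr hiff rfl rfl]
      split
      · have harith : i + ((rest.idxOf '0' : Int) + 1) + 1 = i + 1 + rest.idxOf '0' + 1 := by ring
        push_cast
        rw [List.drop_succ_cons, harith]
      · rfl

lemma phase1 (cs : List Char) (i p : Int) :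
    goA cs i 1 '1' p =
      if '1' ∈ cs then
        goA (cs.drop (cs.idxOf '1' + 1)) (i + cs.idxOf '1' + 1) 2 '0' (i + cs.idxOf '1')
      else 0 := by
  induction cs generalizing i with
  | nil => rfl
  | cons x rest ih =>
    by_cases hx : x = '1'
    · subst hx
      simp [goA, List.idxOf_cons_self]
    · simp only [goA, if_neg hx, ih (i + 1), List.mem_cons, List.idxOf_cons_ne _ hx,
        Nat.succ_eq_add_one]
      have hiff : ('1' = x ∨ '1' ∈ rest) ↔ '1' ∈ rest := or_iff_right (fun h => hx h.symm)
      rw [if_congr hiff rfl rfl]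
      split
      · have h1 : i + ((rest.idxOf '1' : Int) + 1) + 1 = i + 1 + rest.idxOf '1' + 1 := by ring
        have h2 : i + ((rest.idxOf '1' : Int) + 1) = i + 1 + rest.idxOf '1' := by ring
        push_cast
        rw [List.drop_succ_cons, h1, h2]
      · rfl

lemma phase2 (cs : List Char) (i p : Int) :
    goA cs i 2 '0' p = if '0' ∈ cs then p else 0 := by
  induction cs generalizing i with
  | nil => rfl
  | cons x rest ih =>
    by_cases hx : x = '0'
    · subst hx; simp [goA]
    · simp only [goA, if_neg hx, ih (i + 1), List.mem_cons]
      have hiff : ('0' = x ∨ '0' ∈ rest) ↔ '0' ∈ rest := or_iff_right (fun h => hx h.symm)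
      rw [if_congr hiff rfl rfl]

-- ===== VERDICT (by name: the statement is the Claim_ definition above) =====
theorem found_010_spec : Claim_equal_found_010 := by
  intro s _
  unfold Spec_found_010 found_010 found_010_alt findCh
  set cs := s.toList with hcs
  simp only []
  by_cases h0 : '0' ∈ cs
  · set d0 : Nat := cs.idxOf '0' with hd0
    have hi0 : goFind (cs.drop (0 : Int).toNat) 0 '0' = (d0 : Int) := by
      simpa using goFind_mem cs 0 '0' h0
    rw [hi0, phase0 cs 0 0, if_pos h0]
    have hne0 : ((d0 : Int) ≠ -1) := by omega
    rw [if_neg hne0]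
    have htn1 : ((d0 : Int) + 1).toNat = d0 + 1 := by omega
    rw [htn1]
    set cs1 := cs.drop (d0 + 1) with hcs1
    by_cases h1 : '1' ∈ cs1
    · set d1 : Nat := cs1.idxOf '1' with hd1
      have hi1 : goFind cs1 ((d0 : Int) + 1) '1' = (d0 : Int) + 1 + d1 :=
        goFind_mem cs1 _ '1' h1
      rw [hi1, phase1 cs1 ((0 : Int) + d0 + 1) 0, if_pos h1]
      have hne1 : ((d0 : Int) + 1 + d1 ≠ -1) := by omega
      rw [if_neg hne1]
      have htn2 : ((d0 : Int) + 1 + d1 + 1).toNat = d0 + 1 + (d1 + 1) := by omega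
      rw [htn2]
      have hdd : cs.drop (d0 + 1 + (d1 + 1)) = cs1.drop (d1 + 1) := by
        rw [hcs1, List.drop_drop]
      rw [hdd]
      set cs2 := cs1.drop (d1 + 1) with hcs2
      rw [phase2]
      by_cases h2 : '0' ∈ cs2
      · rw [if_pos h2, if_neg (by
          rw [goFind_mem cs2 _ '0' h2]; omega)]
        ring
      · rw [if_neg h2, goFind_not_mem cs2 _ '0' h2, if_pos rfl]
    · rw [phase1 cs1 ((0 : Int) + d0 + 1) 0, if_neg h1,
        goFind_not_mem cs1 _ '1' h1, if_pos rfl]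
  · rw [phase0 cs 0 0, if_neg h0]
    have : goFind (cs.drop (0 : Int).toNat) 0 '0' = -1 := by
      simpa using goFind_not_mem cs 0 '0' h0
    rw [this, if_pos rfl]
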